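-- pv_equiv track=rewrite | github.com/sueszli/vector-database-benchmark | dataset/python-mutated/fuzzymatch.py | asciiFuzzyIndex
-- ===== SOURCE A (Python) =====
-- def asciiFuzzyIndex(target, pattern):
--     if False:
--         i = 10
--         return i + 15
--     "Return a fuzzy* starting position of the pattern,\n    or -1, if pattern isn't a fuzzy match.\n\n    *the position is adapted one back, if possible,\n    for bonus determination reasons.\n    "
--     (first_idx, idx) = (0, 0)
--     for pidx in range(len(pattern)):
--         idx = target.find(pattern[pidx], idx)
--         if idx < 0:
--             return -1
--         if pidx == 0 and idx > 0:
--             first_idx = idx - 1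
--         idx += 1
--     return first_idx
-- ===== SOURCE B (Python) =====
-- def asciiFuzzyIndex(target, pattern):
--     """Single-pass two-pointer scan over target instead of repeated str.find calls."""
--     pidx = 0
--     first_idx = -1
--     for i, ch in enumerate(target):
--         if pidx < len(pattern) and ch == pattern[pidx]:
--             if pidx == 0:
--                 first_idx = i
--             pidx += 1
--     if pidx < len(pattern):
--         return -1
--     return max(0, first_idx - 1)
-- ===== Notes on version B (the rewrite author's own statement) =====
-- stated objective: alternative
-- what changed: Replaces the per-pattern-character str.find loop with a single two-pointer pass over the target, tracking the matched pattern index and the first match position.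
import Mathlib
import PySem

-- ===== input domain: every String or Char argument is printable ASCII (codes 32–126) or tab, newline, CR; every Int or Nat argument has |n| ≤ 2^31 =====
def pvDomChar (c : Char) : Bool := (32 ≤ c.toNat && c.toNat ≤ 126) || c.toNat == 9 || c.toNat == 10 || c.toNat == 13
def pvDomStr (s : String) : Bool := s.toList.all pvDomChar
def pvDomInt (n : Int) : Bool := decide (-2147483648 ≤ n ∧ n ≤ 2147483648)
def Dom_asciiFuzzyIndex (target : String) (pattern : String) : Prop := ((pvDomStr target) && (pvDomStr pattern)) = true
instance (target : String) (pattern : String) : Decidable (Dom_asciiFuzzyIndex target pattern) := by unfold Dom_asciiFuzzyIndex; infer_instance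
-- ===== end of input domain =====

-- B replaces A's per-pattern-character str.find loop by a single two-pointer pass over target (alternative decomposition, same result).

-- ===== PORT A =====
-- A's loop over range(len(pattern)) with state (first_idx, idx); target.find(pattern[pidx], idx) is PySem.Chars.findFrom.
def pvAGo (t : List Char) : List Char → Nat → Int → Int → Int
  | [], _, first_idx, _ => first_idx
  | c :: rest, pidx, first_idx, idx =>
    let j := PySem.Chars.findFrom t [c] idx none
    if j < 0 then -1
    else pvAGo t rest (pidx + 1) (if pidx = 0 ∧ 0 < j then j - 1 else first_idx) (j + 1)

def asciiFuzzyIndex (target : String) (pattern : String) : Int :=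
  pvAGo target.toList pattern.toList 0 0 0

-- ===== PORT B =====
-- B's single pass over target with pattern pointer pidx and first-match index first_idx.
def pvBGo (p : List Char) : List Char → Nat → Nat → Int → Nat × Int
  | [], _, pidx, first_idx => (pidx, first_idx)
  | ch :: rest, i, pidx, first_idx =>
    if p[pidx]? = some ch then
      pvBGo p rest (i + 1) (pidx + 1) (if pidx = 0 then (i : Int) else first_idx)
    else
      pvBGo p rest (i + 1) pidx first_idx

def asciiFuzzyIndex_alt (target : String) (pattern : String) : Int :=
  let r := pvBGo pattern.toList target.toList 0 0 (-1)
  if r.1 < pattern.toList.length then -1 else max 0 (r.2 - 1)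

-- ===== PRECONDITION & SPEC =====
def Spec_asciiFuzzyIndex (target : String) (pattern : String) (out : Int) : Prop := out = asciiFuzzyIndex_alt target pattern
instance (target : String) (pattern : String) (out : Int) : Decidable (Spec_asciiFuzzyIndex target pattern out) := by unfold Spec_asciiFuzzyIndex; infer_instance

-- ===== CLAIM (what is proved, stated in full; the proofs are below) =====
def Claim_equal_asciiFuzzyIndex : Prop := ∀ (target : String) (pattern : String), Dom_asciiFuzzyIndex target pattern → Spec_asciiFuzzyIndex target pattern (asciiFuzzyIndex target pattern)

-- ===== LEMMAS AND PROOFS =====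

-- Common reference: greedy subsequence check, and the spec value both ports compute.
def pvGreedy : List Char → List Char → Bool
  | [], _ => true
  | c :: p, d =>
    match d.idxOf? c with
    | none => false
    | some j => pvGreedy p (d.drop (j + 1))

def pvSpec (t p : List Char) : Int :=
  match p with
  | [] => 0
  | c :: rest =>
    match t.idxOf? c with
    | none => -1
    | some j =>
      if pvGreedy rest (t.drop (j + 1)) then (if 0 < j then (j : Int) - 1 else 0) else -1

lemma pv_singleton_prefix_iff (c : Char) (l : List Char) : [c] <+: l ↔ l.head? = some c := by
  constructor
  · rintro ⟨t, rfl⟩; rfl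
  · intro h
    cases l with
    | nil => simp at h
    | cons a t => simp at h; subst h; exact ⟨t, rfl⟩

lemma pv_singleton_infix_iff (c : Char) (l : List Char) : [c] <:+: l ↔ c ∈ l := by
  constructor
  · intro h; exact h.mem (by simp)
  · intro h
    obtain ⟨s, t, rfl⟩ := List.append_of_mem h
    exact ⟨s, t, by simp⟩

-- Python's s.find(ch) on a 1-char needle is List.idxOf?.
lemma pv_find_single (d : List Char) (c : Char) :
    PySem.Chars.find d [c] = (match d.idxOf? c with | none => -1 | some j => (j : Int)) := by
  cases h : d.idxOf? c with
  | none =>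
    have hm : c ∉ d := List.idxOf?_eq_none_iff.mp h
    simpa using PySem.Chars.find_eq_neg_one_iff d [c] |>.mpr (by
      rw [pv_singleton_infix_iff]; exact hm)
  | some j =>
    obtain ⟨hj, hget, hmin⟩ := List.idxOf?_eq_some_iff.mp h
    have hmem : c ∈ d := by exact hget ▸ List.getElem_mem hj
    have hnn : 0 ≤ PySem.Chars.find d [c] := by
      rw [PySem.Chars.find_nonneg_iff]; rw [pv_singleton_infix_iff]; exact hmem
    obtain ⟨hpre, hfmin⟩ := PySem.Chars.find_spec hnn
    have h1 : d[(PySem.Chars.find d [c]).toNat]? = some c := by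
      rw [← List.head?_drop]; exact (pv_singleton_prefix_iff _ _).mp hpre
    have h2 : (PySem.Chars.find d [c]).toNat = j := by
      rcases lt_trichotomy (PySem.Chars.find d [c]).toNat j with hlt | heq | hgt
      · exact absurd (List.getElem?_eq_some_iff.mp h1).2 (hmin _ hlt)
      · exact heq
      · exact absurd ((pv_singleton_prefix_iff _ _).mpr (by rw [List.head?_drop, List.getElem?_eq_some_iff]; exact ⟨hj, hget⟩)) (hfmin j hgt)
    simp only []
    omega

-- greedy skips a non-matching head of the haystack
lemma pv_greedy_cons_ne (c ch : Char) (r d : List Char) (h : ch ≠ c) :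
    pvGreedy (c :: r) (ch :: d) = pvGreedy (c :: r) d := by
  simp only [pvGreedy, List.idxOf?_cons, beq_iff_eq, if_neg h]
  cases hd : d.idxOf? c with
  | none => simp
  | some j => simp [List.drop_succ_cons]

-- ===== A-side: the tail of A's loop computes the greedy check =====
lemma pvAGo_rest (t : List Char) : ∀ (rest : List Char) (pidx : Nat) (first : Int) (k : Nat),
    1 ≤ pidx → k ≤ t.length →
    pvAGo t rest pidx first (k : Int) = if pvGreedy rest (t.drop k) then first else -1 := by
  intro rest
  induction rest with
  | nil => intro pidx first k _ _; simp [pvAGo, pvGreedy]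
  | cons c r ih =>
    intro pidx first k hp hk
    rw [pvAGo]
    rw [PySem.Chars.findFrom_natCast t [c] k hk, pv_find_single]
    cases hidx : (t.drop k).idxOf? c with
    | none => simp [pvGreedy, hidx]
    | some m =>
      obtain ⟨hm, hgetm, _⟩ := List.idxOf?_eq_some_iff.mp hidx
      have hmlen : k + m < t.length := by
        have := hm; simp [List.length_drop] at this; omega
      simp only []
      rw [if_neg (show ¬((m : Int) = -1) by omega)]
      rw [if_neg (show ¬((k : Int) + (m : Int) < 0) by omega)]
      have hpne : ¬ (pidx = 0 ∧ 0 < (k : Int) + m) := by omega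
      rw [if_neg hpne]
      have hcast : (k : Int) + (m : Int) + 1 = ((k + m + 1 : Nat) : Int) := by push_cast; ring
      rw [hcast, ih (pidx + 1) first (k + m + 1) (by omega) (by omega)]
      have hg : pvGreedy (c :: r) (t.drop k) = pvGreedy r (t.drop (k + m + 1)) := by
        simp only [pvGreedy, hidx, List.drop_drop]
        rw [show k + (m + 1) = k + m + 1 from by omega]
      rw [hg]

lemma pvA_eq_spec (t p : List Char) : pvAGo t p 0 0 0 = pvSpec t p := by
  cases p with
  | nil => simp [pvAGo, pvSpec]
  | cons c rest =>
    rw [pvAGo, pvSpec]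
    have h0 : PySem.Chars.findFrom t [c] 0 none = PySem.Chars.find t [c] := PySem.Chars.findFrom_zero t [c]
    rw [h0, pv_find_single]
    cases hidx : t.idxOf? c with
    | none => simp
    | some j =>
      obtain ⟨hj, _, _⟩ := List.idxOf?_eq_some_iff.mp hidx
      simp only []
      rw [if_neg (show ¬((j : Int) < 0) by omega)]
      have hcast : (j : Int) + 1 = ((j + 1 : Nat) : Int) := by push_cast; ring
      rw [hcast, pvAGo_rest t rest 1 _ (j + 1) (by omega) (by omega)]
      by_cases hg : pvGreedy rest (t.drop (j + 1)) = true
      · rw [if_pos hg, if_pos hg]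
        by_cases hjpos : 0 < j
        · have hjz : (0 : Int) < (j : Int) := by exact_mod_cast hjpos
          rw [if_pos ⟨trivial, hjz⟩, if_pos hjpos]
        · have hjz : ¬((0 : Int) < (j : Int)) := by exact_mod_cast hjpos
          rw [if_neg (fun h => hjz h.2), if_neg hjpos]
      · rw [if_neg (by simpa using hg), if_neg (by simpa using hg)]

-- ===== B-side =====
lemma pvBGo_nil : ∀ (t : List Char) (i k : Nat) (f : Int), pvBGo [] t i k f = (k, f) := by
  intro t
  induction t with
  | nil => intro i k f; rfl
  | cons ch r ih => intro i k f; rw [pvBGo]; simp only [List.getElem?_nil]; simp; exact ih _ _ _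

lemma pvBGo_snd (p : List Char) : ∀ (t : List Char) (i k : Nat) (f : Int),
    1 ≤ k → (pvBGo p t i k f).2 = f := by
  intro t
  induction t with
  | nil => intro i k f _; rfl
  | cons ch r ih =>
    intro i k f hk
    rw [pvBGo]
    split
    · rw [if_neg (by omega)]; exact ih _ _ _ (by omega)
    · exact ih _ _ _ hk

lemma pvBGo_le (p : List Char) : ∀ (t : List Char) (i k : Nat) (f : Int),
    k ≤ p.length → (pvBGo p t i k f).1 ≤ p.length := by
  intro t
  induction t with
  | nil => intro i k f hk; simpa [pvBGo] using hk
  | cons ch r ih =>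
    intro i k f hk
    rw [pvBGo]
    split
    · next h => exact ih _ _ _ (by have := (List.getElem?_eq_some_iff.mp h).1; omega)
    · exact ih _ _ _ hk

lemma pvBGo_full (p : List Char) : ∀ (t : List Char) (i k : Nat) (f : Int),
    k ≤ p.length → ((pvBGo p t i k f).1 = p.length ↔ pvGreedy (p.drop k) t = true) := by
  intro t
  induction t with
  | nil =>
    intro i k f hk
    simp only [pvBGo]
    constructor
    · intro h; have : p.drop k = [] := by simp [List.drop_eq_nil_iff]; omega
      rw [this]; rfl
    · intro h
      cases hd : p.drop k with
      | nil => simp [List.drop_eq_nil_iff] at hd; omega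
      | cons c r => rw [hd] at h; simp [pvGreedy] at h
  | cons ch r ih =>
    intro i k f hk
    rw [pvBGo]
    by_cases h : p[k]? = some ch
    · rw [if_pos h]
      obtain ⟨hklt, hget⟩ := List.getElem?_eq_some_iff.mp h
      have hdrop : p.drop k = ch :: p.drop (k + 1) := by
        rw [← hget]; exact (List.getElem_cons_drop hklt).symm
      rw [hdrop]
      rw [ih _ _ _ (by omega)]
      simp [pvGreedy, List.idxOf?_cons]
    · rw [if_neg h]
      rw [ih _ _ _ hk]
      rcases Nat.lt_or_ge k p.length with hklt | hkge
      · have hget : p[k]? = some p[k] := List.getElem?_eq_some_iff.mpr ⟨hklt, rfl⟩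
        have hne : ch ≠ p[k] := by intro he; exact h (he ▸ hget)
        have hdrop : p.drop k = p[k] :: p.drop (k + 1) := (List.getElem_cons_drop hklt).symm
        rw [hdrop, pv_greedy_cons_ne _ _ _ _ hne]
      · have : p.drop k = [] := by simp [List.drop_eq_nil_iff]; omega
        rw [this]
        simp [pvGreedy]

lemma pvBGo_phase0 (c : Char) (rest : List Char) : ∀ (t : List Char) (i : Nat) (f : Int),
    pvBGo (c :: rest) t i 0 f =
      (match t.idxOf? c with
       | none => (0, f)
       | some j => pvBGo (c :: rest) (t.drop (j + 1)) (i + j + 1) 1 ((i : Int) + j)) := by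
  intro t
  induction t with
  | nil => intro i f; rfl
  | cons ch r ih =>
    intro i f
    rw [pvBGo]
    simp only [List.getElem?_cons_zero, List.idxOf?_cons, beq_iff_eq]
    by_cases hce : ch = c
    · subst hce
      rw [if_pos rfl, if_pos rfl]
      simp [List.drop_succ_cons]
    · rw [if_neg (show ¬(some c = some ch) by intro he; injection he with h; exact hce h.symm)]
      rw [if_neg hce]
      cases hd : r.idxOf? c with
      | none => rw [ih, hd]; rfl
      | some j =>
        rw [ih, hd]
        simp only [Option.map_some, List.drop_succ_cons]
        have h1 : i + 1 + j + 1 = i + (j + 1) + 1 := by omega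
        have h2 : ((i + 1 : Nat) : Int) + (j : Int) = (i : Int) + ((j + 1 : Nat) : Int) := by push_cast; ring
        rw [h1, h2]

lemma pvB_eq_spec (t p : List Char) :
    (let r := pvBGo p t 0 0 (-1); if r.1 < p.length then -1 else max 0 (r.2 - 1)) = pvSpec t p := by
  cases p with
  | nil =>
    rw [pvBGo_nil]
    simp [pvSpec]
  | cons c rest =>
    rw [pvBGo_phase0]
    cases hidx : t.idxOf? c with
    | none => simp [pvSpec, hidx]
    | some j =>
      rw [pvSpec, hidx]
      simp only [Nat.cast_zero, zero_add]
      have hle := pvBGo_le (c :: rest) (t.drop (j + 1)) (j + 1) 1 ((j : Int)) (by simp)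
      have hsnd := pvBGo_snd (c :: rest) (t.drop (j + 1)) (j + 1) 1 ((j : Int)) (by omega)
      have hfull := pvBGo_full (c :: rest) (t.drop (j + 1)) (j + 1) 1 ((j : Int)) (by simp)
      by_cases hg : pvGreedy rest (t.drop (j + 1)) = true
      · have h1 : (pvBGo (c :: rest) (t.drop (j + 1)) (j + 1) 1 ((j : Int))).1 = (c :: rest).length := by
          rw [hfull]; simpa using hg
        rw [if_neg (by omega), if_pos hg, hsnd]
        split_ifs <;> omega
      · have h1 : (pvBGo (c :: rest) (t.drop (j + 1)) (j + 1) 1 ((j : Int))).1 ≠ (c :: rest).length :=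
          fun h => hg (by simpa using hfull.mp h)
        rw [if_pos (by omega), if_neg hg]

-- ===== VERDICT (by name: the statement is the Claim_ definition above) =====
theorem asciiFuzzyIndex_spec : Claim_equal_asciiFuzzyIndex := by
  intro target pattern _
  unfold Spec_asciiFuzzyIndex asciiFuzzyIndex asciiFuzzyIndex_alt
  rw [pvA_eq_spec, ← pvB_eq_spec]
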